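-- pv_equiv track=rewrite | github.com/yamunasoftware/WhatFeed | src/similarity.py | vectorization
-- ===== SOURCE A (Python) =====
-- def vectorization(data):
--   counts = []
--   words = []
--   i = 1
--
--   for entry in data:
--     if entry not in words:
--       words.append(entry)
--       counts.append(i)
--       i += 1
--     else:
--       index = words.index(entry)
--       words.append(entry)
--       counts.append(counts[index])
--   return words, counts
-- ===== SOURCE B (Python) =====
-- def vectorization(data):
--   # Sort-and-rank: the id of a value is the 1-based rank of its first-occurrence
--   # index among the first-occurrence indices of all distinct values.
--   first = {x: j for j, x in reversed(list(enumerate(data)))}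
--   rank = {j: r for r, j in enumerate(sorted(first.values()), 1)}
--   return list(data), [rank[first[x]] for x in data]
-- ===== Notes on version B (the rewrite author's own statement) =====
-- stated objective: faster
-- what changed: Replaces A's single stateful branched pass (growing words/counts with an id counter and in-loop .index scans) by a sort-and-rank algorithm: a reversed-enumerate dict yields each value's first-occurrence index, those indices are sorted and ranked 1..k, and the output is a branch-free rank lookup per element.
import Mathlib
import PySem

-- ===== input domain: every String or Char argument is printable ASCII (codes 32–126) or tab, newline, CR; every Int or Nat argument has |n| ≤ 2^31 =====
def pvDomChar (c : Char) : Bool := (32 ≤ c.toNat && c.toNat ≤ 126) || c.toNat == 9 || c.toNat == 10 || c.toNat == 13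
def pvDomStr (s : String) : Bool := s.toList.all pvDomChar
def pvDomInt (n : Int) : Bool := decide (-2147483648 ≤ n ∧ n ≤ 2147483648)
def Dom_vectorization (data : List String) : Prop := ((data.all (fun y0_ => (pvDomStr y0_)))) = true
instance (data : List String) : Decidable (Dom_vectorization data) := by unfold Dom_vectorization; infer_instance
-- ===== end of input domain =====

-- B replaces A's stateful branched pass (with in-loop .index scans) by a sort-and-rank
-- algorithm: first-occurrence indices from a reversed-enumerate dict, sorted and ranked
-- (measured faster in a timing run).

-- ===== PORT A =====
-- counts[index] is exact via pyGetD: in the else-branch entry ∈ words, so index? is some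
-- and the index is in range of counts (same length as words).
def vectorization (data : List String) : List String × List Int :=
  let st := data.foldl (fun (st : List String × List Int × Int) entry =>
    let words := st.1
    let counts := st.2.1
    let i := st.2.2
    if entry ∉ words then
      (words ++ [entry], counts ++ [i], i + 1)
    else
      let index := (PySem.List.index? words entry).getD 0
      (words ++ [entry], counts ++ [PySem.List.pyGetD counts (index : Int) 0], i))
    ([], [], 1)
  (st.1, st.2.1)

-- ===== PORT B =====
-- dict comprehensions become foldl-insert over the comprehension's pair list;
-- rank[first[x]] is exact via getD: both lookups always hit for x ∈ data.
def vectorization_alt (data : List String) : List String × List Int :=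
  let first : PySem.Dict String Int :=
    ((PySem.List.enumerate data).reverse).foldl
      (fun d p => d.insert p.2 p.1) PySem.Dict.empty
  let rank : PySem.Dict Int Int :=
    (PySem.List.enumerate (PySem.List.sorted first.values (fun j => j) false) 1).foldl
      (fun d p => d.insert p.2 p.1) PySem.Dict.empty
  (data, data.map (fun x => rank.getD (first.getD x 0) 0))

-- ===== PRECONDITION & SPEC =====
def Spec_vectorization (data : List String) (out : List String × List Int) : Prop := out = vectorization_alt data
instance (data : List String) (out : List String × List Int) : Decidable (Spec_vectorization data out) := by unfold Spec_vectorization; infer_instance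

-- ===== CLAIM =====
def Claim_equal_vectorization : Prop := ∀ (data : List String), Dom_vectorization data → Spec_vectorization data (vectorization data)

-- ===== LEMMAS AND PROOFS =====

-- The id both programs assign: 1 + position of x among the distinct values in first-occurrence order.
def pvId (xs : List String) (x : String) : Int :=
  ((PySem.List.index? (PySem.Set.ofList xs) x).getD 0 : Int) + 1

-- First-occurrence index of x in data, as an Int.
def pvFIdx (data : List String) (x : String) : Int :=
  ((PySem.List.index? data x).getD 0 : Int)

theorem pvId_append_of_mem (p : List String) (e w : String) (hw : w ∈ p) :
    pvId (p ++ [e]) w = pvId p w := by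
  unfold pvId
  rw [PySem.Set.ofList_append_singleton]
  by_cases he : e ∈ PySem.Set.ofList p
  · rw [PySem.Set.add_of_mem he]
  · rw [PySem.Set.add_of_not_mem he,
      PySem.List.index?_append_of_mem _ ((PySem.Set.mem_ofList _ _).2 hw)]

-- ---------- A-side loop invariant ----------
theorem vectorization_loop (rest : List String) :
    ∀ (p : List String),
      rest.foldl (fun (st : List String × List Int × Int) entry =>
        let words := st.1
        let counts := st.2.1
        let i := st.2.2
        if entry ∉ words then
          (words ++ [entry], counts ++ [i], i + 1)
        else
          let index := (PySem.List.index? words entry).getD 0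
          (words ++ [entry], counts ++ [PySem.List.pyGetD counts (index : Int) 0], i))
        (p, p.map (pvId p), ((PySem.Set.ofList p).length : Int) + 1)
      = (p ++ rest, (p ++ rest).map (pvId (p ++ rest)),
         ((PySem.Set.ofList (p ++ rest)).length : Int) + 1) := by
  induction rest with
  | nil => intro p; simp
  | cons e rest ih =>
    intro p
    simp only [List.foldl_cons]
    by_cases he : e ∈ p
    · -- seen element: A copies counts at e's first index; the distinct count is unchanged
      rw [if_neg (by simpa using he)]
      obtain ⟨k, hk⟩ := Option.isSome_iff_exists.mp ((PySem.List.index?_isSome_iff _ _).2 he)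
      obtain ⟨hklt, hpe, -⟩ := PySem.List.getElem_of_index?_eq_some hk
      have hget : PySem.List.pyGetD (p.map (pvId p))
          (((PySem.List.index? p e).getD 0 : Nat) : Int) 0 = pvId p e := by
        rw [hk]
        simp only [Option.getD_some]
        rw [PySem.List.pyGetD_natCast]
        rw [List.getD_eq_getElem _ _ (by simpa using hklt)]
        simp [hpe]
      rw [hget]
      have hmap : p.map (pvId p) ++ [pvId p e] = (p ++ [e]).map (pvId (p ++ [e])) := by
        rw [List.map_append, List.map_singleton]
        congr 1
        · exact (List.map_congr_left fun w hw => (pvId_append_of_mem p e w hw).symm)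
        · rw [pvId_append_of_mem p e e he]
      have hset : PySem.Set.ofList (p ++ [e]) = PySem.Set.ofList p := by
        rw [PySem.Set.ofList_append_singleton,
          PySem.Set.add_of_mem ((PySem.Set.mem_ofList _ _).2 he)]
      rw [hmap, ← hset]
      rw [ih (p ++ [e])]
      simp
    · -- new element: A appends the fresh id i = (distinct count of p) + 1
      rw [if_pos (by simpa using he)]
      have hset : PySem.Set.ofList (p ++ [e]) = PySem.Set.ofList p ++ [e] := by
        rw [PySem.Set.ofList_append_singleton,
          PySem.Set.add_of_not_mem (fun h => he ((PySem.Set.mem_ofList _ _).1 h))]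
      have hlast : pvId (p ++ [e]) e = ((PySem.Set.ofList p).length : Int) + 1 := by
        unfold pvId
        rw [hset, PySem.List.index?_append_singleton_self _ _
          (fun h => he ((PySem.Set.mem_ofList _ _).1 h))]
        simp
      have hmap : p.map (pvId p) ++ [((PySem.Set.ofList p).length : Int) + 1]
          = (p ++ [e]).map (pvId (p ++ [e])) := by
        rw [List.map_append, List.map_singleton]
        congr 1
        · exact (List.map_congr_left fun w hw => (pvId_append_of_mem p e w hw).symm)
        · rw [hlast]
      have hi : ((PySem.Set.ofList p).length : Int) + 1 + 1
          = ((PySem.Set.ofList (p ++ [e])).length : Int) + 1 := by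
        rw [hset]; push_cast [List.length_append, List.length_singleton]; ring
      rw [hmap, hi]
      rw [ih (p ++ [e])]
      simp

theorem vectorization_eq_map (data : List String) :
    vectorization data = (data, data.map (pvId data)) := by
  unfold vectorization
  have h := vectorization_loop data []
  simp only [List.map_nil, List.nil_append] at h
  rw [show ((PySem.Set.ofList ([] : List String)).length : Int) + 1 = 1 by decide] at h
  rw [h]

-- ---------- B-side: dicts built by foldl-insert ----------

-- Lookup in a foldl-insert dict: the LAST pair with the key wins.
theorem get?_foldl_insert_pairs {κ ν : Type} [BEq κ] [LawfulBEq κ]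
    (l : List (ν × κ)) (d : PySem.Dict κ ν) (x : κ) :
    (l.foldl (fun d p => d.insert p.2 p.1) d).get? x =
      (match l.reverse.find? (fun p => p.2 == x) with
       | some p => some p.1
       | none => d.get? x) := by
  induction l generalizing d with
  | nil => simp
  | cons p l ih =>
    simp only [List.foldl_cons, List.reverse_cons, List.find?_append]
    rw [ih]
    cases hf : l.reverse.find? (fun p => p.2 == x) with
    | some q => simp
    | none =>
      simp only [Option.none_or]
      by_cases hpx : p.2 = x
      · subst hpx
        simp [PySem.Dict.get?_insert_self]
      · have : (p.2 == x) = false := by simp [hpx]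
        simp only [List.find?_singleton, this, Bool.false_eq_true, if_false]
        rw [PySem.Dict.get?_insert_of_ne _ _ (fun h => hpx h.symm)]

-- find? over an enumeration locates the FIRST occurrence.
theorem find?_enumerate (data : List String) :
    ∀ (s : Int) (x : String),
      (PySem.List.enumerate data s).find? (fun p => p.2 == x) =
        (PySem.List.index? data x).map (fun k => (s + (k : Int), x)) := by
  induction data with
  | nil => intro s x; simp [PySem.List.enumerate_nil]
  | cons y ys ih =>
    intro s x
    rw [PySem.List.enumerate_cons]
    by_cases hyx : y = x
    · subst hyx
      rw [PySem.List.index?_cons_self]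
      simp
    · have hb : (y == x) = false := by simp [hyx]
      rw [List.find?_cons_of_neg (by simp [hb]), ih (s + 1) x,
        PySem.List.index?_cons_of_ne _ hyx]
      cases h : PySem.List.index? ys x with
      | none => simp
      | some k =>
        simp
        ring

-- the `first` dict maps each x ∈ data to its first-occurrence index
theorem get?_first (data : List String) (x : String) (hx : x ∈ data) :
    (((PySem.List.enumerate data).reverse).foldl
      (fun (d : PySem.Dict String Int) p => d.insert p.2 p.1) PySem.Dict.empty).get? x
      = some (pvFIdx data x) := by
  rw [get?_foldl_insert_pairs, List.reverse_reverse, find?_enumerate data 0 x]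
  obtain ⟨k, hk⟩ := Option.isSome_iff_exists.mp ((PySem.List.index?_isSome_iff _ _).2 hx)
  rw [hk]
  rw [PySem.List.index?_eq_idxOf?] at hk
  simp [pvFIdx, hk]

-- folding inserts whose keys all differ from x leaves x's binding alone
theorem get?_foldl_insert_of_not_key {κ ν : Type} [BEq κ] [LawfulBEq κ]
    (l : List (ν × κ)) (d : PySem.Dict κ ν) (x : κ) (h : ∀ p ∈ l, p.2 ≠ x) :
    (l.foldl (fun d p => d.insert p.2 p.1) d).get? x = d.get? x := by
  induction l generalizing d with
  | nil => rfl
  | cons p l ih =>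
    simp only [List.foldl_cons]
    rw [ih _ (fun q hq => h q (List.mem_cons_of_mem _ hq)),
      PySem.Dict.get?_insert_of_ne _ _ (fun he => h p (List.mem_cons_self) he.symm)]

-- the `rank` dict maps the i-th element of a Nodup list to s + i
theorem get?_rank (ys : List Int) (hnd : ys.Nodup) :
    ∀ (s : Int) (d : PySem.Dict Int Int) (j : Int) (i : Nat),
      PySem.List.index? ys j = some i →
      ((PySem.List.enumerate ys s).foldl
        (fun (d : PySem.Dict Int Int) p => d.insert p.2 p.1) d).get? j = some (s + i) := by
  induction ys with
  | nil => intro s d j i h; simp [PySem.List.index?_eq_idxOf?] at h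
  | cons y ys ih =>
    intro s d j i h
    rw [PySem.List.enumerate_cons]
    simp only [List.foldl_cons]
    by_cases hyj : y = j
    · subst hyj
      rw [PySem.List.index?_cons_self] at h
      obtain rfl : (0 : Nat) = i := Option.some.inj h
      rw [get?_foldl_insert_of_not_key _ _ _ (by
        intro p hp
        obtain ⟨k, hk, rfl⟩ := (PySem.List.mem_enumerate_iff _ _ _).1 hp
        intro hcontr
        exact (List.nodup_cons.1 hnd).1 (by rw [← hcontr]; exact List.getElem_mem hk))]
      rw [PySem.Dict.get?_insert_self]
      simp
    · rw [PySem.List.index?_cons_of_ne _ hyj] at h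
      cases h' : PySem.List.index? ys j with
      | none => rw [h'] at h; simp at h
      | some i' =>
        rw [h'] at h
        simp only [Option.map_some] at h
        obtain rfl : i' + 1 = i := Option.some.inj h
        rw [ih (List.nodup_cons.1 hnd).2 (s + 1) _ j i' h']
        congr 1
        push_cast
        ring

-- first-occurrence indices are strictly increasing along the distinct values
theorem pvFIdx_pairwise (data : List String) :
    (PySem.Set.ofList data).Pairwise (fun a b => pvFIdx data a < pvFIdx data b) := by
  induction data using List.reverseRecOn with
  | nil => simp
  | append_singleton p e ih =>
    rw [PySem.Set.ofList_append_singleton]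
    have hcong : ∀ w ∈ p, pvFIdx (p ++ [e]) w = pvFIdx p w := by
      intro w hw
      unfold pvFIdx
      rw [PySem.List.index?_append_of_mem _ hw]
    by_cases he : e ∈ p
    · rw [PySem.Set.add_of_mem ((PySem.Set.mem_ofList _ _).2 he)]
      refine ih.imp_of_mem ?_
      intro a b ha hb hab
      rw [hcong a ((PySem.Set.mem_ofList _ _).1 ha), hcong b ((PySem.Set.mem_ofList _ _).1 hb)]
      exact hab
    · rw [PySem.Set.add_of_not_mem (fun h => he ((PySem.Set.mem_ofList _ _).1 h))]
      rw [List.pairwise_append]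
      refine ⟨ih.imp_of_mem ?_, List.pairwise_singleton _ _, ?_⟩
      · intro a b ha hb hab
        rw [hcong a ((PySem.Set.mem_ofList _ _).1 ha), hcong b ((PySem.Set.mem_ofList _ _).1 hb)]
        exact hab
      · intro a ha b hb
        rw [List.mem_singleton] at hb
        subst hb
        have hap : a ∈ p := (PySem.Set.mem_ofList _ _).1 ha
        rw [hcong a hap]
        obtain ⟨k, hk⟩ := Option.isSome_iff_exists.mp ((PySem.List.index?_isSome_iff _ _).2 hap)
        obtain ⟨hklt, -, -⟩ := PySem.List.getElem_of_index?_eq_some hk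
        unfold pvFIdx
        rw [hk, PySem.List.index?_append_singleton_self _ _ he]
        simp only [Option.getD_some]
        omega

-- index? commutes with mapping a strictly increasing function
theorem index?_map_pairwise (f : String → Int) (l : List String) (x : String)
    (hx : x ∈ l) (hp : l.Pairwise (fun a b => f a < f b)) :
    PySem.List.index? (l.map f) (f x) = PySem.List.index? l x := by
  induction l with
  | nil => simp at hx
  | cons y t ih =>
    rw [List.pairwise_cons] at hp
    by_cases hyx : y = x
    · subst hyx
      rw [List.map_cons, PySem.List.index?_cons_self, PySem.List.index?_cons_self]
    · have hxt : x ∈ t := by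
        cases hx with
        | head => exact absurd rfl hyx
        | tail _ h => exact h
      have hfy : f y ≠ f x := ne_of_lt (hp.1 x hxt)
      rw [List.map_cons, PySem.List.index?_cons_of_ne _ hfy,
        PySem.List.index?_cons_of_ne _ hyx, ih hxt hp.2]

-- the `first` dict, as a named helper for the proofs
def pvFirstD (data : List String) : PySem.Dict String Int :=
  ((PySem.List.enumerate data).reverse).foldl
    (fun (d : PySem.Dict String Int) p => d.insert p.2 p.1) PySem.Dict.empty

theorem pvFirstD_keys (data : List String) :
    (pvFirstD data).keys = PySem.Set.ofList data.reverse := by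
  unfold pvFirstD
  rw [PySem.Dict.keys_foldl_insert_key _ (fun (p : Int × String) => p.2) (fun d p => p.1),
    PySem.Dict.keys_empty, PySem.Set.update_nil_left]
  simp [List.map_reverse, PySem.List.map_snd_enumerate]

-- the sorted values of `first` are exactly the first indices along the distinct values
theorem sorted_first_values (data : List String) :
    PySem.List.sorted (pvFirstD data).values (fun j => j) false
    = (PySem.Set.ofList data).map (pvFIdx data) := by
  have hnd : (pvFirstD data).keys.Nodup := by
    rw [pvFirstD_keys]; exact PySem.Set.nodup_ofList _
  have hvals : (pvFirstD data).values = (PySem.Set.ofList data.reverse).map (pvFIdx data) := by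
    rw [PySem.Dict.values_eq_map_keys (pvFirstD data) hnd 0, pvFirstD_keys]
    refine List.map_congr_left ?_
    intro k hk
    have hkd : k ∈ data := by
      rw [← List.mem_reverse]
      exact (PySem.Set.mem_ofList _ _).1 hk
    rw [PySem.Dict.getD_eq_get?_getD]
    show ((pvFirstD data).get? k).getD 0 = pvFIdx data k
    unfold pvFirstD
    rw [get?_first data k hkd]
    rfl
  refine PySem.List.sorted_eq_of_perm_of_pairwise_lt _ _ _ ?_ ?_
  · rw [hvals]
    refine List.Perm.map _ ?_
    rw [List.perm_ext_iff_of_nodup (PySem.Set.nodup_ofList _) (PySem.Set.nodup_ofList _)]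
    intro a
    rw [PySem.Set.mem_ofList, PySem.Set.mem_ofList, List.mem_reverse]
  · exact List.pairwise_map.2 (pvFIdx_pairwise data)

-- ---------- final assembly ----------
theorem alt_eq_map (data : List String) :
    vectorization_alt data = (data, data.map (pvId data)) := by
  unfold vectorization_alt
  refine Prod.ext rfl ?_
  simp only
  refine List.map_congr_left ?_
  intro x hx
  have hfd : ((PySem.List.enumerate data).reverse).foldl
      (fun (d : PySem.Dict String Int) p => d.insert p.2 p.1) PySem.Dict.empty
      = pvFirstD data := rfl
  rw [hfd, sorted_first_values data]
  have hxd : x ∈ PySem.Set.ofList data := (PySem.Set.mem_ofList _ _).2 hx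
  obtain ⟨i, hi⟩ := Option.isSome_iff_exists.mp ((PySem.List.index?_isSome_iff _ _).2 hxd)
  have hfirst : (pvFirstD data).getD x 0 = pvFIdx data x := by
    rw [PySem.Dict.getD_eq_get?_getD]
    show ((pvFirstD data).get? x).getD 0 = pvFIdx data x
    unfold pvFirstD
    rw [get?_first data x hx]
    rfl
  rw [hfirst]
  have hnd : ((PySem.Set.ofList data).map (pvFIdx data)).Nodup := by
    have hpw := (List.pairwise_map.2 (pvFIdx_pairwise data) :
      ((PySem.Set.ofList data).map (pvFIdx data)).Pairwise (· < ·))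
    exact hpw.imp ne_of_lt
  have hidx : PySem.List.index? ((PySem.Set.ofList data).map (pvFIdx data)) (pvFIdx data x)
      = some i := by
    rw [index?_map_pairwise (pvFIdx data) _ x hxd (pvFIdx_pairwise data), hi]
  rw [PySem.Dict.getD_eq_get?_getD,
    get?_rank _ hnd 1 PySem.Dict.empty (pvFIdx data x) i hidx]
  unfold pvId
  rw [hi]
  simp only [Option.getD_some]
  ring

-- ===== VERDICT =====
theorem vectorization_spec : Claim_equal_vectorization := by
  intro data _
  unfold Spec_vectorization
  rw [vectorization_eq_map, alt_eq_map]
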